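-- pv_equiv track=rewrite | github.com/Rejean-McCormick/abstract-wiki-architect | tools/everything_matrix/rgl_scanner.py | _build_iso2_to_iso3
-- ===== SOURCE A (Python) =====
-- from typing import Any, Dict, Mapping, Optional, Set
--
-- def _build_iso2_to_iso3(iso_to_wiki: Mapping[str, Any]) -> Dict[str, str]:
--     """
--     Build iso2 -> iso3 preference map from iso_to_wiki.json when possible.
--     If multiple iso3 map to the same wiki code, pick the first seen deterministically.
--     """
--     iso2_to_iso3: Dict[str, str] = {}
--     wiki_to_iso3: Dict[str, str] = {}
--
--     for k in sorted(iso_to_wiki.keys(), key=lambda x: str(x).casefold()):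
--         v = iso_to_wiki.get(k)
--         if not (isinstance(k, str) and isinstance(v, Mapping)):
--             continue
--         kk = k.strip().casefold()
--         wiki = v.get("wiki")
--         if not (isinstance(wiki, str) and wiki.strip()):
--             continue
--         wk = wiki.strip().casefold()
--         if len(kk) == 3 and wk not in wiki_to_iso3:
--             wiki_to_iso3[wk] = kk
--
--     for k, v in iso_to_wiki.items():
--         if not (isinstance(k, str) and isinstance(v, Mapping)):
--             continue
--         kk = k.strip().casefold()
--         if len(kk) != 2:
--             continue
--         wiki = v.get("wiki")
--         if not (isinstance(wiki, str) and wiki.strip()):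
--             continue
--         wk = wiki.strip().casefold()
--         iso3 = wiki_to_iso3.get(wk)
--         if iso3:
--             iso2_to_iso3[kk] = iso3
--
--     return iso2_to_iso3
-- ===== SOURCE B (Python) =====
-- from typing import Any, Dict, Mapping, Optional
--
--
-- def _candidates(iso_to_wiki):
--     """Yield (wk, sort_key, kk) for every valid 3-letter entry, in mapping order."""
--     for k, v in iso_to_wiki.items():
--         if not (isinstance(k, str) and isinstance(v, Mapping)):
--             continue
--         kk = k.strip().casefold()
--         if len(kk) != 3:
--             continue
--         wiki = v.get("wiki")
--         if not (isinstance(wiki, str) and wiki.strip()):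
--             continue
--         yield wiki.strip().casefold(), str(k).casefold(), kk
--
--
-- def _build_iso2_to_iso3(iso_to_wiki: Mapping[str, Any]) -> Dict[str, str]:
--     # Single unsorted pass instead of sort-then-first-seen: per wiki code keep the
--     # candidate whose casefolded original key is smallest (strict <, so the earliest
--     # of equal-casefold keys wins, matching the stable sort's first-seen tie-break).
--     best: Dict[str, tuple] = {}
--     for wk, sk, kk in _candidates(iso_to_wiki):
--         cur = best.get(wk)
--         if cur is None or sk < cur[0]:
--             best[wk] = (sk, kk)
--     wiki_to_iso3 = {wk: skkk[1] for wk, skkk in best.items()}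
--
--     iso2_to_iso3: Dict[str, str] = {}
--     for k, v in iso_to_wiki.items():
--         if not (isinstance(k, str) and isinstance(v, Mapping)):
--             continue
--         kk = k.strip().casefold()
--         if len(kk) != 2:
--             continue
--         wiki = v.get("wiki")
--         if not (isinstance(wiki, str) and wiki.strip()):
--             continue
--         iso3 = wiki_to_iso3.get(wiki.strip().casefold())
--         if iso3:
--             iso2_to_iso3[kk] = iso3
--     return iso2_to_iso3
-- ===== Notes on version B (the rewrite author's own statement) =====
-- stated objective: alternative
-- what changed: The sort-then-first-seen first pass over all keys is replaced by a single unsorted pass that keeps, per wiki code, the candidate with the smallest casefolded key (strict < so the first of equal-casefold keys wins, matching the stable sort's first-seen tie-break); the second pass is unchanged.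
import Mathlib
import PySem

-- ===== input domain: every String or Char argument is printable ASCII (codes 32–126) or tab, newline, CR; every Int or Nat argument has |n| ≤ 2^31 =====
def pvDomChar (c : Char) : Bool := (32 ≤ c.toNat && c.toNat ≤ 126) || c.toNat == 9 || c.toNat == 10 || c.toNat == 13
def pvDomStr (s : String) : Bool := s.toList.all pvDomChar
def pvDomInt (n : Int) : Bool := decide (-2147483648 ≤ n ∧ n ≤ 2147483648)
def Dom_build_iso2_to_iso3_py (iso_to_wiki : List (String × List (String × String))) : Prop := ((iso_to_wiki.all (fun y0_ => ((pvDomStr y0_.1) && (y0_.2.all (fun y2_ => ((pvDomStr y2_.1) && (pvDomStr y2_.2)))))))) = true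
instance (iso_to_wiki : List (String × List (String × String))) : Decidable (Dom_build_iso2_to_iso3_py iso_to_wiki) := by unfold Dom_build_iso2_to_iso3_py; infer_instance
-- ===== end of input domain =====

-- B replaces A's sort-then-first-seen first pass by one unsorted min-keeping pass (alternative algorithm, same result).
-- Note: str.casefold() is ported as PySem.Str.lower, exact on the ASCII input domain Dom_.

-- ===== PORT A =====
def build_iso2_to_iso3_py (iso_to_wiki : List (String × List (String × String))) : List (String × String) :=
  -- for k in sorted(iso_to_wiki.keys(), key=lambda x: str(x).casefold())
  let sortedKeys := PySem.List.sorted (iso_to_wiki.map (fun p => p.1)) (fun x => PySem.Str.lower x) false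
  let wiki_to_iso3 : PySem.Dict String String :=
    sortedKeys.foldl (fun d k =>
      match PySem.Dict.get? ⟨iso_to_wiki⟩ k with
      | none => d                                   -- v = None → isinstance check fails → continue
      | some v =>
        let kk := PySem.Str.lower (PySem.Str.strip k)
        match PySem.Dict.get? ⟨v⟩ "wiki" with
        | none => d                                 -- wiki = None → continue
        | some wiki =>
          if PySem.Str.strip wiki == "" then d      -- not wiki.strip() → continue
          else
            let wk := PySem.Str.lower (PySem.Str.strip wiki)
            if PySem.Str.len kk == 3 && !(d.contains wk) then d.insert wk kk else d)
      PySem.Dict.empty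
  let iso2_to_iso3 : PySem.Dict String String :=
    iso_to_wiki.foldl (fun d p =>
      let kk := PySem.Str.lower (PySem.Str.strip p.1)
      if !(PySem.Str.len kk == 2) then d
      else
        match PySem.Dict.get? ⟨p.2⟩ "wiki" with
        | none => d
        | some wiki =>
          if PySem.Str.strip wiki == "" then d
          else
            match wiki_to_iso3.get? (PySem.Str.lower (PySem.Str.strip wiki)) with
            | none => d
            | some iso3 => if iso3 == "" then d else d.insert kk iso3)   -- 'if iso3:' = not None and not ""
      PySem.Dict.empty
  iso2_to_iso3.items

-- ===== PORT B =====
-- per-element body of Source B's _candidates generator; the generator itself is the filterMap below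
def pvCandB (p : String × List (String × String)) : Option (String × String × String) :=
  let kk := PySem.Str.lower (PySem.Str.strip p.1)
  if !(PySem.Str.len kk == 3) then none
  else
    match PySem.Dict.get? ⟨p.2⟩ "wiki" with
    | none => none
    | some wiki =>
      if PySem.Str.strip wiki == "" then none
      else some (PySem.Str.lower (PySem.Str.strip wiki), PySem.Str.lower p.1, kk)

def build_iso2_to_iso3_py_alt (iso_to_wiki : List (String × List (String × String))) : List (String × String) :=
  -- best[wk] = (sk, kk) with minimal sk, first wins on ties (strict <)
  let best : PySem.Dict String (String × String) :=
    (iso_to_wiki.filterMap pvCandB).foldl (fun d c =>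
      match d.get? c.1 with
      | none => d.insert c.1 c.2
      | some cur => if c.2.1 < cur.1 then d.insert c.1 c.2 else d)
      PySem.Dict.empty
  -- wiki_to_iso3 = {wk: kk for wk, (sk, kk) in best.items()} (keys of best are distinct)
  let wiki_to_iso3 : PySem.Dict String String := ⟨best.items.map (fun q => (q.1, q.2.2))⟩
  let iso2_to_iso3 : PySem.Dict String String :=
    iso_to_wiki.foldl (fun d p =>
      let kk := PySem.Str.lower (PySem.Str.strip p.1)
      if !(PySem.Str.len kk == 2) then d
      else
        match PySem.Dict.get? ⟨p.2⟩ "wiki" with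
        | none => d
        | some wiki =>
          if PySem.Str.strip wiki == "" then d
          else
            match wiki_to_iso3.get? (PySem.Str.lower (PySem.Str.strip wiki)) with
            | none => d
            | some iso3 => if iso3 == "" then d else d.insert kk iso3)
      PySem.Dict.empty
  iso2_to_iso3.items

-- ===== PRECONDITION & SPEC =====
-- Pre_ excludes association lists a Python dict argument cannot represent: duplicate top-level
-- keys, or more than one "wiki" key inside one value (dict construction collapses duplicates,
-- keeping the last value, while the association-list model looks up the first match).
def Pre_build_iso2_to_iso3_py (iso_to_wiki : List (String × List (String × String))) : Prop :=
  (iso_to_wiki.map (fun p => p.1)).Nodup ∧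
    ∀ p ∈ iso_to_wiki, (p.2.map (fun q => q.1)).count "wiki" ≤ 1
instance (iso_to_wiki : List (String × List (String × String))) : Decidable (Pre_build_iso2_to_iso3_py iso_to_wiki) := by unfold Pre_build_iso2_to_iso3_py; infer_instance

def pvWitness_build_iso2_to_iso3_py : (List (String × List (String × String))) :=
  [("ABc ", [("wiki", "enW")]), ("ab", [("wiki", " enw "), ("x", "y")])]

def Spec_build_iso2_to_iso3_py (iso_to_wiki : List (String × List (String × String))) (out : List (String × String)) : Prop := out = build_iso2_to_iso3_py_alt iso_to_wiki
instance (iso_to_wiki : List (String × List (String × String))) (out : List (String × String)) : Decidable (Spec_build_iso2_to_iso3_py iso_to_wiki out) := by unfold Spec_build_iso2_to_iso3_py; infer_instance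

-- ===== CLAIM (what is proved, stated in full; the proofs are below) =====
def Claim_equal_build_iso2_to_iso3_py : Prop := ∀ (iso_to_wiki : List (String × List (String × String))), Dom_build_iso2_to_iso3_py iso_to_wiki → Pre_build_iso2_to_iso3_py iso_to_wiki → Spec_build_iso2_to_iso3_py iso_to_wiki (build_iso2_to_iso3_py iso_to_wiki)

-- ===== LEMMAS AND PROOFS =====

-- insertBy commutes with map when the comparison factors through the map
theorem pv_insertBy_map {α β : Type} (bf : β → β → Bool) (g : α → β) (x : α) (ys : List α) :
    PySem.List.insertBy bf (g x) (ys.map g)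
      = (PySem.List.insertBy (fun a b => bf (g a) (g b)) x ys).map g := by
  induction ys with
  | nil => simp [PySem.List.insertBy]
  | cons y t ih =>
    simp only [List.map_cons, PySem.List.insertBy]
    by_cases h : bf (g x) (g y) = true <;> simp [h, ih]

-- sorting the keys = sorting the pairs by key-of-fst, then projecting
theorem pv_sorted_map {α β κ : Type} [LinearOrder κ] (g : α → β) (K : β → κ) (l : List α) :
    PySem.List.sorted (l.map g) K false
      = (PySem.List.sorted l (fun p => K (g p)) false).map g := by
  rw [PySem.List.sorted_eq_foldl_insertBy, PySem.List.sorted_eq_foldl_insertBy, List.foldl_map]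
  suffices h : ∀ (l : List α) (acc : List α),
      List.foldl (fun acc x => PySem.List.insertBy (fun a b => decide (K a < K b)) (g x) acc) (acc.map g) l
        = (List.foldl (fun acc x => PySem.List.insertBy (fun a b => decide (K (g a) < K (g b))) x acc) acc l).map g by
    simpa using h l []
  intro l
  induction l with
  | nil => intro acc; simp
  | cons x t ih =>
    intro acc
    simp only [List.foldl_cons]
    rw [pv_insertBy_map (fun a b => decide (K a < K b)) g x acc, ih]

-- first-match lookup in a nodup-keyed association list finds the pair itself
theorem pv_find?_nodup {α : Type} (l : List (String × α)) (h : (l.map (fun p => p.1)).Nodup)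
    (p : String × α) (hp : p ∈ l) : l.find? (fun q => q.1 == p.1) = some p := by
  induction l with
  | nil => cases hp
  | cons a t ih =>
    simp only [List.map_cons, List.nodup_cons] at h
    rcases List.mem_cons.mp hp with rfl | hmem
    · simp [List.find?]
    · have hne : a.1 ≠ p.1 := by
        intro he; exact h.1 (he ▸ List.mem_map_of_mem hmem)
      have hb : (a.1 == p.1) = false := by simpa using hne
      rw [List.find?_cons, hb]
      exact ih h.2 hmem

-- A's first-pass step, keyed on the optional candidate
def pvStepA (d : PySem.Dict String String) :
    Option (String × String × String) → PySem.Dict String String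
  | none => d
  | some c => if d.contains c.1 then d else d.insert c.1 c.2.2

-- a fold whose body filters through pvCandB is a fold over the filterMap
theorem pv_foldl_stepA (l : List (String × List (String × String)))
    (init : PySem.Dict String String) :
    l.foldl (fun d p => pvStepA d (pvCandB p)) init
      = (l.filterMap pvCandB).foldl
          (fun d c => if d.contains c.1 then d else d.insert c.1 c.2.2) init := by
  induction l generalizing init with
  | nil => rfl
  | cons x t ih =>
    simp only [List.foldl_cons, List.filterMap_cons]
    cases h : pvCandB x with
    | none => exact ih init
    | some c => exact ih _

-- filterMap through insertBy into a key-sorted list (the stability argument)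
theorem pv_filterMap_insertBy {α β κ : Type} [LinearOrder κ] (f : α → Option β)
    (K : α → κ) (K' : β → κ) (hkey : ∀ p c, f p = some c → K' c = K p)
    (x : α) (ys : List α) (hs : ys.Pairwise (fun a b => K a ≤ K b)) :
    (PySem.List.insertBy (fun a b => decide (K a < K b)) x ys).filterMap f
      = match f x with
        | none => ys.filterMap f
        | some c => PySem.List.insertBy (fun a b => decide (K' a < K' b)) c (ys.filterMap f) := by
  induction ys with
  | nil =>
    simp only [PySem.List.insertBy, List.filterMap_nil, List.filterMap_cons]
    cases hfx : f x <;> simp []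
  | cons y t ih =>
    have hy : ∀ z ∈ t, K y ≤ K z := (List.pairwise_cons.mp hs).1
    have ht : t.Pairwise (fun a b => K a ≤ K b) := (List.pairwise_cons.mp hs).2
    simp only [PySem.List.insertBy]
    by_cases hlt : decide (K x < K y) = true
    · rw [if_pos hlt]
      simp only [List.filterMap_cons]
      cases hfx : f x with
      | none => simp
      | some c =>
        -- c goes to the very front: every kept element of y :: t has key ≥ K y > K x = K' c
        have hxy : K x < K y := of_decide_eq_true hlt
        have hkc : K' c = K x := hkey _ _ hfx
        cases hfy : f y with
        | none =>
          cases hft : t.filterMap f with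
          | nil => simp [PySem.List.insertBy]
          | cons z zs =>
            have hz : z ∈ t.filterMap f := hft ▸ List.mem_cons_self
            obtain ⟨z', hz', hfz'⟩ := List.mem_filterMap.mp hz
            have : K' c < K' z := by
              rw [hkc, hkey _ _ hfz']
              exact lt_of_lt_of_le hxy (hy _ hz')
            simp [PySem.List.insertBy, this]
        | some cy =>
          have : K' c < K' cy := by
            rw [hkc, hkey _ _ hfy]; exact hxy
          simp [PySem.List.insertBy, this]
    · rw [if_neg hlt]
      simp only [List.filterMap_cons]
      have hnlt : ¬ K x < K y := by simpa using hlt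
      cases hfx : f x with
      | none => rw [ih ht]; simp [hfx]
      | some c =>
        rw [ih ht]; simp only [hfx]
        cases hfy : f y with
        | none => simp
        | some cy =>
          have : ¬ K' c < K' cy := by rw [hkey _ _ hfx, hkey _ _ hfy]; exact hnlt
          simp [PySem.List.insertBy, this]

-- filterMap commutes with the stable sort when the key is preserved
theorem pv_filterMap_sorted {α β κ : Type} [LinearOrder κ] (f : α → Option β)
    (K : α → κ) (K' : β → κ) (hkey : ∀ p c, f p = some c → K' c = K p) (l : List α) :
    (PySem.List.sorted l K false).filterMap f
      = PySem.List.sorted (l.filterMap f) K' false := by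
  induction l using List.reverseRecOn with
  | nil => simp [PySem.List.sorted]
  | append_singleton t x ih =>
    have hsA : PySem.List.sorted (t ++ [x]) K false
        = PySem.List.insertBy (fun a b => decide (K a < K b)) x (PySem.List.sorted t K false) := by
      rw [PySem.List.sorted_eq_foldl_insertBy, PySem.List.sorted_eq_foldl_insertBy,
        List.foldl_append]
      rfl
    rw [hsA, pv_filterMap_insertBy f K K' hkey x _ (PySem.List.sorted_pairwise t K),
      List.filterMap_append]
    cases hfx : f x with
    | none => simp [hfx, ih]
    | some c =>
      simp only [hfx, List.filterMap_cons, List.filterMap_nil]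
      rw [ih, PySem.List.sorted_eq_foldl_insertBy (List.filterMap f t ++ [c]) K',
        List.foldl_append, ← PySem.List.sorted_eq_foldl_insertBy]
      rfl

-- A's first pass body, with the looked-up pair inlined, filters through pvCandB
theorem pv_bodyA_eq (d : PySem.Dict String String) (p : String × List (String × String)) :
    (let kk := PySem.Str.lower (PySem.Str.strip p.1)
     match PySem.Dict.get? ⟨p.2⟩ "wiki" with
     | none => d
     | some wiki =>
       if PySem.Str.strip wiki == "" then d
       else
         let wk := PySem.Str.lower (PySem.Str.strip wiki)
         if PySem.Str.len kk == 3 && !(d.contains wk) then d.insert wk kk else d)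
      = pvStepA d (pvCandB p) := by
  simp only [pvCandB, pvStepA]
  cases hw : PySem.Dict.get? (⟨p.2⟩ : PySem.Dict String String) "wiki" with
  | none => cases h3 : (PySem.Str.len (PySem.Str.lower (PySem.Str.strip p.1)) == 3) <;> simp []
  | some wiki =>
    cases h3 : (PySem.Str.len (PySem.Str.lower (PySem.Str.strip p.1)) == 3) <;>
      cases he : (PySem.Str.strip wiki == "")
    · simp []
    · simp []
    · cases hc : d.contains (PySem.Str.lower (PySem.Str.strip wiki)) <;> simp [he, hc]
    · simp [he]

-- pvCandB stores the sort key lower p.1 in position .2.1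
theorem pv_candB_key (p : String × List (String × String)) (c : String × String × String)
    (h : pvCandB p = some c) : c.2.1 = PySem.Str.lower p.1 := by
  simp only [pvCandB] at h
  split at h
  · exact absurd h (by simp)
  · split at h
    · exact absurd h (by simp)
    · split at h
      · exact absurd h (by simp)
      · have h' := Option.some_inj.mp h
        subst h'
        rfl

-- first-seen fold: lookup = first matching candidate
theorem pv_firstSeen_get? (cs : List (String × String × String))
    (d0 : PySem.Dict String String) (w : String) :
    (cs.foldl (fun d c => if d.contains c.1 then d else d.insert c.1 c.2.2) d0).get? w
      = match d0.get? w with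
        | some v => some v
        | none => (cs.find? (fun c => c.1 == w)).map (fun c => c.2.2) := by
  induction cs generalizing d0 with
  | nil => simp; cases d0.get? w <;> rfl
  | cons c t ih =>
    simp only [List.foldl_cons, List.find?]
    by_cases hc : d0.contains c.1 = true
    · rw [if_pos hc, ih]
      have hsome : (d0.get? c.1).isSome := by rw [← PySem.Dict.contains_eq_isSome_get?]; exact hc
      by_cases hw : c.1 = w
      · subst hw
        cases hg : d0.get? c.1 with
        | none => rw [hg] at hsome; simp at hsome
        | some v => simp
      · have hb : (c.1 == w) = false := by simpa using hw
        rw [hb]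
    · rw [if_neg hc, ih]
      have hnone : d0.get? c.1 = none := by
        cases hg : d0.get? c.1 with
        | none => rfl
        | some v => rw [PySem.Dict.contains_eq_isSome_get?, hg] at hc; simp at hc
      by_cases hw : c.1 = w
      · subst hw
        rw [PySem.Dict.get?_insert, if_pos rfl, hnone]
        simp
      · rw [PySem.Dict.get?_insert, if_neg (fun he => hw he.symm)]
        have hb : (c.1 == w) = false := by simpa using hw
        rw [hb]

-- min-keeping fold: lookup = running minimum over matching candidates
theorem pv_best_get? (cs : List (String × String × String))
    (d0 : PySem.Dict String (String × String)) (w : String) :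
    (cs.foldl (fun d c =>
        match d.get? c.1 with
        | none => d.insert c.1 c.2
        | some cur => if c.2.1 < cur.1 then d.insert c.1 c.2 else d) d0).get? w
      = cs.foldl (fun o c =>
          if c.1 = w then
            match o with
            | none => some c.2
            | some cur => if c.2.1 < cur.1 then some c.2 else some cur
          else o) (d0.get? w) := by
  induction cs generalizing d0 with
  | nil => rfl
  | cons c t ih =>
    simp only [List.foldl_cons]
    rw [ih]
    congr 1
    by_cases hw : c.1 = w
    · subst hw
      cases hg : d0.get? c.1 with
      | none => simp []
      | some cur =>
        by_cases hlt : c.2.1 < cur.1 <;> simp [hlt, hg]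
    · have hw' : ¬ w = c.1 := fun he => hw he.symm
      cases hg : d0.get? c.1 with
      | none => simp [PySem.Dict.get?_insert, hw, hw']
      | some cur =>
        by_cases hlt : c.2.1 < cur.1 <;> simp [hlt, PySem.Dict.get?_insert, hw, hw']

-- the two folds above, started from the empty dictionary
theorem pv_firstSeen_get?_empty (cs : List (String × String × String)) (w : String) :
    (cs.foldl (fun d c => if d.contains c.1 then d else d.insert c.1 c.2.2)
        PySem.Dict.empty).get? w
      = (cs.find? (fun c => c.1 == w)).map (fun c => c.2.2) := by
  rw [pv_firstSeen_get?]
  simp [PySem.Dict.get?_empty]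

theorem pv_best_get?_empty (cs : List (String × String × String)) (w : String) :
    (cs.foldl (fun d c =>
        match d.get? c.1 with
        | none => d.insert c.1 c.2
        | some cur => if c.2.1 < cur.1 then d.insert c.1 c.2 else d)
        PySem.Dict.empty).get? w
      = cs.foldl (fun o c =>
          if c.1 = w then
            match o with
            | none => some c.2
            | some cur => if c.2.1 < cur.1 then some c.2 else some cur
          else o) none := by
  rw [pv_best_get?]
  simp [PySem.Dict.get?_empty]

-- find? through insertBy into a key-sorted list is one min-update step
theorem pv_find?_insertBy {β κ : Type} [LinearOrder κ] (K' : β → κ) (pw : β → Bool)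
    (x : β) (ys : List β) (hs : ys.Pairwise (fun a b => K' a ≤ K' b)) :
    (PySem.List.insertBy (fun a b => decide (K' a < K' b)) x ys).find? pw
      = if pw x then
          match ys.find? pw with
          | none => some x
          | some b => if K' x < K' b then some x else some b
        else ys.find? pw := by
  induction ys with
  | nil =>
    simp only [PySem.List.insertBy, List.find?]
    by_cases hp : pw x = true <;> simp [hp]
  | cons y t ih =>
    have hy : ∀ z ∈ t, K' y ≤ K' z := (List.pairwise_cons.mp hs).1
    have ht : t.Pairwise (fun a b => K' a ≤ K' b) := (List.pairwise_cons.mp hs).2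
    simp only [PySem.List.insertBy]
    by_cases hlt : decide (K' x < K' y) = true
    · have hxy : K' x < K' y := of_decide_eq_true hlt
      rw [if_pos hlt, List.find?_cons]
      by_cases hp : pw x = true
      · rw [hp]
        simp only [if_true]
        cases hf : List.find? pw (y :: t) with
        | none => rfl
        | some b =>
          have hb : b ∈ y :: t := List.mem_of_find?_eq_some hf
          have hKb : K' x < K' b := by
            rcases List.mem_cons.mp hb with rfl | hbt
            · exact hxy
            · exact lt_of_lt_of_le hxy (hy _ hbt)
          simp [hKb]
      · have hp' : pw x = false := by simpa using hp
        rw [hp']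
        simp
    · have hnlt : ¬ K' x < K' y := by simpa using hlt
      rw [if_neg hlt, List.find?_cons, List.find?_cons]
      by_cases hpy : pw y = true
      · by_cases hp : pw x = true <;> simp [hpy, hp, hnlt]
      · have hpy' : pw y = false := by simpa using hpy
        rw [hpy']
        simp only []
        exact ih ht

-- find? on the sorted candidates = left-to-right running minimum (stability)
theorem pv_find?_sorted {β κ : Type} [LinearOrder κ] (K' : β → κ) (pw : β → Bool)
    (cs : List β) :
    (PySem.List.sorted cs K' false).find? pw
      = cs.foldl (fun o c =>
          if pw c then
            match o with
            | none => some c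
            | some b => if K' c < K' b then some c else some b
          else o) none := by
  induction cs using List.reverseRecOn with
  | nil => simp [PySem.List.sorted]
  | append_singleton t x ih =>
    have hsA : PySem.List.sorted (t ++ [x]) K' false
        = PySem.List.insertBy (fun a b => decide (K' a < K' b)) x (PySem.List.sorted t K' false) := by
      rw [PySem.List.sorted_eq_foldl_insertBy, PySem.List.sorted_eq_foldl_insertBy,
        List.foldl_append]
      rfl
    rw [hsA, pv_find?_insertBy K' pw x _ (PySem.List.sorted_pairwise t K'), List.foldl_append, ih]
    simp only [List.foldl_cons, List.foldl_nil]

-- the two running accumulators correspond under .2 projection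
theorem pv_am_corr (w : String) (cs : List (String × String × String))
    (o : Option (String × String × String)) :
    (cs.foldl (fun o c =>
        if c.1 == w then
          match o with
          | none => some c
          | some b => if c.2.1 < b.2.1 then some c else some b
        else o) o).map (fun c => c.2.2)
      = (cs.foldl (fun o c =>
          if c.1 = w then
            match o with
            | none => some c.2
            | some cur => if c.2.1 < cur.1 then some c.2 else some cur
          else o) (o.map (fun c => c.2))).map (fun q => q.2) := by
  induction cs generalizing o with
  | nil => cases o <;> rfl
  | cons c t ih =>
    simp only [List.foldl_cons]
    by_cases hw : c.1 = w
    · simp only [hw, BEq.rfl, if_true]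
      cases o with
      | none => exact ih (some c)
      | some b =>
        by_cases hlt : c.2.1 < b.2.1
        · simp only [Option.map_some, hlt, if_true]
          exact ih (some c)
        · simp only [Option.map_some, hlt, if_false]
          exact ih (some b)
    · have hb : (c.1 == w) = false := by simpa using hw
      simp only [hw, hb, Bool.false_eq_true, if_false]
      exact ih o

-- find? over a mapped association list
theorem pv_get?_map_proj (items : List (String × String × String)) (w : String) :
    (PySem.Dict.get? (⟨items.map (fun q => (q.1, q.2.2))⟩ : PySem.Dict String String) w)
      = ((items.find? (fun q => q.1 == w)).map (fun q => q.2.2)) := by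
  simp only [PySem.Dict.get?, List.find?_map, Option.map_map]
  rfl

-- the two first-pass dictionaries agree on every lookup
theorem pv_w2i_agree (m : List (String × List (String × String)))
    (hpre : (m.map (fun p => p.1)).Nodup) (w : String) :
    (PySem.Dict.get?
      ((PySem.List.sorted (m.map (fun p => p.1)) (fun x => PySem.Str.lower x) false).foldl
        (fun d k =>
          match PySem.Dict.get? (⟨m⟩ : PySem.Dict String (List (String × String))) k with
          | none => d
          | some v =>
            let kk := PySem.Str.lower (PySem.Str.strip k)
            match PySem.Dict.get? (⟨v⟩ : PySem.Dict String String) "wiki" with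
            | none => d
            | some wiki =>
              if PySem.Str.strip wiki == "" then d
              else
                let wk := PySem.Str.lower (PySem.Str.strip wiki)
                if PySem.Str.len kk == 3 && !(d.contains wk) then d.insert wk kk else d)
        PySem.Dict.empty) w)
    = (PySem.Dict.get?
        (⟨((m.filterMap pvCandB).foldl (fun d c =>
            match d.get? c.1 with
            | none => d.insert c.1 c.2
            | some cur => if c.2.1 < cur.1 then d.insert c.1 c.2 else d)
            PySem.Dict.empty).items.map (fun q => (q.1, q.2.2))⟩ : PySem.Dict String String) w) := by
  rw [pv_sorted_map (fun p => p.1) (fun x => PySem.Str.lower x) m, List.foldl_map]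
  rw [PySem.List.foldl_congr_mem _ _
    (fun d (p : String × List (String × String)) => pvStepA d (pvCandB p)) PySem.Dict.empty
    (by
      intro acc p hp
      have hpm : p ∈ m := (PySem.List.mem_sorted _ _ _ _).mp hp
      have hfind : m.find? (fun q => q.1 == p.1) = some p := pv_find?_nodup m hpre p hpm
      have hget : PySem.Dict.get? (⟨m⟩ : PySem.Dict String (List (String × String))) p.1
          = some p.2 := by
        simp only [PySem.Dict.get?, hfind, Option.map_some]
      rw [hget]
      exact pv_bodyA_eq acc p)]
  rw [pv_foldl_stepA]
  rw [pv_filterMap_sorted pvCandB (fun p => PySem.Str.lower p.1) (fun c => c.2.1)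
    pv_candB_key m]
  rw [pv_firstSeen_get?_empty]
  rw [pv_find?_sorted (β := String × String × String) (κ := String)
    (fun c => c.2.1) (fun c => c.1 == w) (m.filterMap pvCandB)]
  rw [pv_get?_map_proj]
  have hbest : ∀ (d : PySem.Dict String (String × String)),
      (d.items.find? (fun q => q.1 == w)).map (fun q => q.2.2)
        = (d.get? w).map (fun q => q.2) := by
    intro d
    simp only [PySem.Dict.get?, Option.map_map]
    rfl
  rw [hbest, pv_best_get?_empty]
  have ham := pv_am_corr w (m.filterMap pvCandB) none
  simp only [Option.map_none] at ham
  convert ham using 2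
  congr 1
  funext o c
  by_cases hc : (c.1 == w) = true
  · simp only [hc, if_true]
    cases o with
    | none => rfl
    | some b => by_cases hlt : c.2.1 < b.2.1 <;> simp [hlt]
  · simp [hc]

-- ===== VERDICT (by name: the statement is the Claim_ definition above) =====
theorem build_iso2_to_iso3_py_spec : Claim_equal_build_iso2_to_iso3_py := by
  intro m _hdom hpre
  unfold Spec_build_iso2_to_iso3_py
  simp only [build_iso2_to_iso3_py, build_iso2_to_iso3_py_alt]
  refine congrArg PySem.Dict.items ?_
  apply PySem.List.foldl_congr_mem
  intro acc p _
  simp only [pv_w2i_agree m hpre.1]
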